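-- pv_equiv track=rewrite | github.com/QueryPlanner/upgraded-garbanzo | src/agent/telegram/model_settings.py | resolve_model_freeform
-- ===== SOURCE A (Python) =====
-- from typing import Any, Literal
--
-- ProviderId = Literal["openai", "openrouter"]
--
-- OPENAI_MODELS: tuple[str, ...] = (
--     "openai/glm-4.7",
--     "openai/glm-5",
-- )
--
-- OPENROUTER_MODELS: tuple[str, ...] = (
--     "openrouter/z-ai/glm-4.7",
--     "openrouter/minimax/minimax-m2.7",
--     "openrouter/moonshotai/kimi-k2.5",
--     "openrouter/z-ai/glm-5",
-- )
--
-- PROVIDER_MODELS: dict[ProviderId, tuple[str, ...]] = {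
--     "openai": OPENAI_MODELS,
--     "openrouter": OPENROUTER_MODELS,
-- }
--
-- def models_for_provider(provider: ProviderId) -> tuple[str, ...]:
--     return PROVIDER_MODELS[provider]
--
-- def _strip_openrouter_prefix(s: str) -> str:
--     return s.removeprefix("openrouter/").strip()
--
-- def resolve_model_argument(
--     provider: ProviderId,
--     arg: str,
-- ) -> tuple[str | None, str | None]:
--     """Return ``(full_model_id, error_message)`` for one provider (non-menu)."""
--     raw = arg.strip()
--     if not raw:
--         return None, "Model name or index is required."
--
--     if raw.isdigit():
--         idx = int(raw)
--         options = models_for_provider(provider)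
--         if idx < 1 or idx > len(options):
--             return (
--                 None,
--                 f"Pick a number from 1 to {len(options)} for this provider.",
--             )
--         return options[idx - 1], None
--
--     for full in models_for_provider(provider):
--         if raw == full:
--             return full, None
--
--     if provider == "openrouter":
--         suffix = _strip_openrouter_prefix(raw)
--         normalized_suffix = suffix.removeprefix("/")
--         for full in OPENROUTER_MODELS:
--             rest = _strip_openrouter_prefix(full)
--             if rest in (suffix, normalized_suffix):
--                 return full, None
--
--     if provider == "openai":
--         candidate = raw if "/" in raw else f"openai/{raw}"
--         if candidate in OPENAI_MODELS:
--             return candidate, None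
--
--     return None, f"Unknown model {raw!r} for provider {provider}."
--
-- def resolve_model_freeform(arg: str) -> tuple[str | None, str | None]:
--     """Resolve a text model id by trying each provider (not used for plain digits)."""
--     raw = arg.strip()
--     if not raw:
--         return None, "Send a model id or a number from /model."
--
--     providers: tuple[ProviderId, ...] = ("openai", "openrouter")
--     for prov in providers:
--         full, _err = resolve_model_argument(prov, raw)
--         if full is not None:
--             return full, None
--
--     return (
--         None,
--         f"Unknown model {raw!r}. Send /model for the numbered list.",
--     )
-- ===== SOURCE B (Python) =====
-- # B: resolve text forms through one precomputed normalization table per provider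
-- # instead of re-scanning the model lists on every call; digits pick from the
-- # providers' numbered menus in order.
--
-- from typing import Any, Literal
--
-- ProviderId = Literal["openai", "openrouter"]
--
-- OPENAI_MODELS: tuple[str, ...] = (
--     "openai/glm-4.7",
--     "openai/glm-5",
-- )
--
-- OPENROUTER_MODELS: tuple[str, ...] = (
--     "openrouter/z-ai/glm-4.7",
--     "openrouter/minimax/minimax-m2.7",
--     "openrouter/moonshotai/kimi-k2.5",
--     "openrouter/z-ai/glm-5",
-- )
--
-- # every accepted openai spelling: the full id and the bare model name
-- _OPENAI_FORMS: dict[str, str] = {}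
-- for _full in OPENAI_MODELS:
--     _OPENAI_FORMS[_full] = _full
--     _OPENAI_FORMS[_full.removeprefix("openai/")] = _full
--
-- # every accepted openrouter sub-path (with and without a leading slash),
-- # keyed after the provider prefix has been normalized away
-- _OPENROUTER_FORMS: dict[str, str] = {}
-- for _full in OPENROUTER_MODELS:
--     _sub = _full.removeprefix("openrouter/")
--     _OPENROUTER_FORMS[_sub] = _full
--     _OPENROUTER_FORMS["/" + _sub] = _full
--
--
-- def resolve_model_freeform(arg: str) -> tuple[str | None, str | None]:
--     raw = arg.strip()
--     if not raw:
--         return None, "Send a model id or a number from /model."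
--     if raw.isdigit():
--         idx = int(raw)
--         for models in (OPENAI_MODELS, OPENROUTER_MODELS):
--             if 1 <= idx <= len(models):
--                 return models[idx - 1], None
--     else:
--         hit = _OPENAI_FORMS.get(raw)
--         if hit is None:
--             hit = _OPENROUTER_FORMS.get(raw.removeprefix("openrouter/").strip())
--         if hit is not None:
--             return hit, None
--     return None, f"Unknown model {raw!r}. Send /model for the numbered list."
-- ===== Notes on version B (the rewrite author's own statement) =====
-- stated objective: simpler
-- what changed: Replaces A's per-provider delegation into resolve_model_argument (membership scans and suffix-comparison loops over the model tuples on every call) with two module-level normalization dicts built once from the model lists, so a text lookup is a strip plus at most two dict gets; digit input picks from the providers' numbered menus in order.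
import Mathlib
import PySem

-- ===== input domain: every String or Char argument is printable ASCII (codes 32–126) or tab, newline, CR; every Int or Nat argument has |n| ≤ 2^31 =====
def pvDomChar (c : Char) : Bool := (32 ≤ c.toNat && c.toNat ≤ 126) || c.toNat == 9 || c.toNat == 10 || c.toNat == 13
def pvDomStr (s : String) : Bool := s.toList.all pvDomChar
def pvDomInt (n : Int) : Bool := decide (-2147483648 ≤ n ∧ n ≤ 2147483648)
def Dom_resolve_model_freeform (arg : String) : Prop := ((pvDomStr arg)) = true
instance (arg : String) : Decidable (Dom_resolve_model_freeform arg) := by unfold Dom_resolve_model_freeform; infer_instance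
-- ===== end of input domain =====

-- B resolves text forms through one precomputed normalization table per provider instead
-- of re-scanning the model lists per call; digits pick from the numbered menus in order.
-- Objective: simpler.

-- ===== PORT A =====
-- shared hand-ports of Python built-ins both sources use:
-- str.removeprefix(p) (exact: drop p iff it is a prefix)
def pvRemovePrefix (s p : List Char) : List Char :=
  if p.isPrefixOf s then s.drop p.length else s

-- f"{raw!r}" — Python repr of a str; exact on printable ASCII plus tab/newline/CR
def pvReprChar (q : Char) (c : Char) : List Char :=
  if c = '\\' then ['\\', '\\']
  else if c = Char.ofNat 9 then ['\\', 't']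
  else if c = Char.ofNat 10 then ['\\', 'n']
  else if c = Char.ofNat 13 then ['\\', 'r']
  else if c = q then ['\\', q]
  else [c]

def pvRepr (s : List Char) : List Char :=
  let q : Char := if s.contains '\'' && !(s.contains '"') then '"' else '\''
  q :: s.flatMap (pvReprChar q) ++ [q]

def OPENAI_MODELS : List (List Char) := ["openai/glm-4.7".toList, "openai/glm-5".toList]

def OPENROUTER_MODELS : List (List Char) :=
  ["openrouter/z-ai/glm-4.7".toList, "openrouter/minimax/minimax-m2.7".toList,
   "openrouter/moonshotai/kimi-k2.5".toList, "openrouter/z-ai/glm-5".toList]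

-- PROVIDER_MODELS[provider]; provider is the Literal "openai" | "openrouter", so the
-- dict lookup never raises and is ported as this two-way branch
def models_for_provider (provider : String) : List (List Char) :=
  if provider = "openai" then OPENAI_MODELS else OPENROUTER_MODELS

def _strip_openrouter_prefix (s : List Char) : List Char :=
  PySem.Chars.strip (pvRemovePrefix s "openrouter/".toList)

def resolve_model_argument (provider : String) (arg : List Char) :
    Option (List Char) × Option (List Char) :=
  let raw := PySem.Chars.strip arg
  if raw = [] then (none, some "Model name or index is required.".toList)
  else if PySem.Chars.strIsdigit raw then
    -- int(raw): raw.isdigit() guarantees the parse succeeds, getD is unreachable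
    let idx : Int := (PySem.Int.ofChars? raw).getD 0
    let options := models_for_provider provider
    if idx < 1 ∨ idx > (options.length : Int) then
      (none, some ("Pick a number from 1 to ".toList ++ PySem.Int.toChars options.length
                   ++ " for this provider.".toList))
    else ((PySem.List.pyGet? options (idx - 1)).getD [] |> some, none)
  else
    match (models_for_provider provider).find? (fun full => raw == full) with
    | some full => (some full, none)
    | none =>
      let orHit : Option (List Char) :=
        if provider = "openrouter" then
          let suffix := _strip_openrouter_prefix raw
          let normalized_suffix := pvRemovePrefix suffix ['/']
          OPENROUTER_MODELS.find? (fun full =>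
            let rest := _strip_openrouter_prefix full
            rest == suffix || rest == normalized_suffix)
        else none
      match orHit with
      | some full => (some full, none)
      | none =>
        let oaHit : Option (List Char) :=
          if provider = "openai" then
            let candidate := if PySem.Chars.isIn "/".toList raw then raw
                             else "openai/".toList ++ raw
            if OPENAI_MODELS.contains candidate then some candidate else none
          else none
        match oaHit with
        | some c => (some c, none)
        | none =>
          (none, some ("Unknown model ".toList ++ pvRepr raw ++ " for provider ".toList
                       ++ provider.toList ++ ".".toList))

def resolve_model_freeform (arg : String) : Option String × Option String :=
  let raw := PySem.Chars.strip arg.toList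
  if raw = [] then (none, some "Send a model id or a number from /model.")
  else
    match (resolve_model_argument "openai" raw).1 with
    | some full => (some (String.ofList full), none)
    | none =>
      match (resolve_model_argument "openrouter" raw).1 with
      | some full => (some (String.ofList full), none)
      | none =>
        (none, some (String.ofList ("Unknown model ".toList ++ pvRepr raw
                     ++ ". Send /model for the numbered list.".toList)))

-- ===== PORT B =====
-- module-level table-building loops of Source B, as folds over the model lists
def pvOpenaiForms : PySem.Dict (List Char) (List Char) :=
  OPENAI_MODELS.foldl
    (fun d full => (d.insert full full).insert (pvRemovePrefix full "openai/".toList) full)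
    PySem.Dict.empty

def pvOpenrouterForms : PySem.Dict (List Char) (List Char) :=
  OPENROUTER_MODELS.foldl
    (fun d full =>
      let sub := pvRemovePrefix full "openrouter/".toList
      (d.insert sub full).insert ('/' :: sub) full)
    PySem.Dict.empty

def resolve_model_freeform_alt (arg : String) : Option String × Option String :=
  let raw := PySem.Chars.strip arg.toList
  if raw = [] then (none, some "Send a model id or a number from /model.")
  else
    let hit : Option (List Char) :=
      if PySem.Chars.strIsdigit raw then
        let idx : Int := (PySem.Int.ofChars? raw).getD 0
        match [OPENAI_MODELS, OPENROUTER_MODELS].find?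
            (fun models => decide (1 ≤ idx ∧ idx ≤ (models.length : Int))) with
        | some models => some ((PySem.List.pyGet? models (idx - 1)).getD [])
        | none => none
      else
        match pvOpenaiForms.get? raw with
        | some h => some h
        | none => pvOpenrouterForms.get? (PySem.Chars.strip (pvRemovePrefix raw "openrouter/".toList))
    match hit with
    | some h => (some (String.ofList h), none)
    | none =>
      (none, some (String.ofList ("Unknown model ".toList ++ pvRepr raw
                   ++ ". Send /model for the numbered list.".toList)))

-- ===== PRECONDITION & SPEC =====
def Spec_resolve_model_freeform (arg : String) (out : Option String × Option String) : Prop := out = resolve_model_freeform_alt arg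
instance (arg : String) (out : Option String × Option String) : Decidable (Spec_resolve_model_freeform arg out) := by unfold Spec_resolve_model_freeform; infer_instance

-- ===== CLAIM (what is proved, stated in full; the proofs are below) =====
def Claim_equal_resolve_model_freeform : Prop := ∀ (arg : String), Dom_resolve_model_freeform arg → Spec_resolve_model_freeform arg (resolve_model_freeform arg)

-- ===== LEMMAS AND PROOFS =====
lemma pv_dropWhile_of_prefix (p : Char → Bool) {u v : List Char} (hv : v <+: u)
    (hu : List.dropWhile p u = u) : List.dropWhile p v = v := by
  cases v with
  | nil => simp
  | cons a t =>
    obtain ⟨w, rfl⟩ := hv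
    have ha : p a = false := by
      by_contra h
      have h' : p a = true := by simpa using h
      have h2 : List.dropWhile p (a :: t ++ w) = List.dropWhile p (t ++ w) := by
        simp [h']
      rw [hu] at h2
      have h3 := List.length_dropWhile_le p (t ++ w)
      rw [← h2] at h3
      simp at h3
    simp [ha]

-- Python's strip is idempotent (freeform re-strips the already stripped input)
lemma pv_strip_strip (s : List Char) :
    PySem.Chars.strip (PySem.Chars.strip s) = PySem.Chars.strip s := by
  simp only [PySem.Chars.strip, PySem.Chars.lstrip, PySem.Chars.rstrip]
  have hu := List.dropWhile_idempotent (l := s) (p := PySem.Chars.isspace)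
  generalize hG : List.dropWhile PySem.Chars.isspace s = u at hu
  have hpre : (List.dropWhile PySem.Chars.isspace u.reverse).reverse <+: u := by
    obtain ⟨w, hw⟩ := List.dropWhile_suffix (l := u.reverse) PySem.Chars.isspace
    refine ⟨w.reverse, ?_⟩
    have := congrArg List.reverse hw
    simpa using this
  rw [pv_dropWhile_of_prefix _ hpre hu, List.reverse_reverse, List.dropWhile_idempotent]

-- s.removeprefix("/") ≠ rest when s is neither rest nor '/'+rest
lemma pv_rp_slash_ne {s rest : List Char} (h1 : s ≠ rest) (h2 : s ≠ '/' :: rest) :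
    pvRemovePrefix s ['/'] ≠ rest := by
  cases s with
  | nil => simpa [pvRemovePrefix, List.isPrefixOf] using h1
  | cons a t =>
    by_cases ha : a = '/'
    · subst ha
      have hr : pvRemovePrefix ('/' :: t) ['/'] = t := by
        simp [pvRemovePrefix, List.isPrefixOf]
      rw [hr]
      intro he
      exact h2 (by rw [he])
    · have hp : List.isPrefixOf ['/'] (a :: t) = false := by
        simp [List.isPrefixOf, Ne.symm ha]
      simpa [pvRemovePrefix, hp] using h1

-- the folds that build B's tables, evaluated
lemma pv_oa_forms_eq : pvOpenaiForms = PySem.Dict.ofList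
    [("openai/glm-4.7".toList, "openai/glm-4.7".toList),
     ("glm-4.7".toList, "openai/glm-4.7".toList),
     ("openai/glm-5".toList, "openai/glm-5".toList),
     ("glm-5".toList, "openai/glm-5".toList)] := by decide

lemma pv_or_forms_eq : pvOpenrouterForms = PySem.Dict.ofList
    [("z-ai/glm-4.7".toList, "openrouter/z-ai/glm-4.7".toList),
     ("/z-ai/glm-4.7".toList, "openrouter/z-ai/glm-4.7".toList),
     ("minimax/minimax-m2.7".toList, "openrouter/minimax/minimax-m2.7".toList),
     ("/minimax/minimax-m2.7".toList, "openrouter/minimax/minimax-m2.7".toList),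
     ("moonshotai/kimi-k2.5".toList, "openrouter/moonshotai/kimi-k2.5".toList),
     ("/moonshotai/kimi-k2.5".toList, "openrouter/moonshotai/kimi-k2.5".toList),
     ("z-ai/glm-5".toList, "openrouter/z-ai/glm-5".toList),
     ("/z-ai/glm-5".toList, "openrouter/z-ai/glm-5".toList)] := by decide

-- on a digit string both providers resolve purely by index
lemma pv_arg_digit (prov : String) (l : List Char) (hl : PySem.Chars.strip l = l)
    (h0 : ¬ l = []) (hd : PySem.Chars.strIsdigit l = true) :
    (resolve_model_argument prov l).1 =
      (let idx := (PySem.Int.ofChars? l).getD 0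
       let options := models_for_provider prov
       if idx < 1 ∨ idx > (options.length : Int) then none
       else some ((PySem.List.pyGet? options (idx - 1)).getD [])) := by
  simp only [resolve_model_argument, hl, h0, hd, if_false, if_true]
  split <;> simp_all

-- on non-digit input the openai provider resolves exactly via B's textual table
set_option maxRecDepth 8192 in
lemma pv_arg_text_openai (l : List Char) (hl : PySem.Chars.strip l = l) (h0 : ¬ l = [])
    (hd : ¬ PySem.Chars.strIsdigit l = true) :
    (resolve_model_argument "openai" l).1 = pvOpenaiForms.get? l := by
  rw [pv_oa_forms_eq]
  by_cases e1 : l = "openai/glm-4.7".toList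
  · subst e1; decide
  by_cases e2 : l = "glm-4.7".toList
  · subst e2; decide
  by_cases e3 : l = "openai/glm-5".toList
  · subst e3; decide
  by_cases e4 : l = "glm-5".toList
  · subst e4; decide
  have hget : (PySem.Dict.ofList
      [("openai/glm-4.7".toList, "openai/glm-4.7".toList),
       ("glm-4.7".toList, "openai/glm-4.7".toList),
       ("openai/glm-5".toList, "openai/glm-5".toList),
       ("glm-5".toList, "openai/glm-5".toList)]).get? l = none := by
    simp_all [PySem.Dict.ofList, PySem.Dict.update, PySem.Dict.get?_insert]
  rw [hget]
  simp only [resolve_model_argument, hl, h0, hd, if_false]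
  simp only [models_for_provider, OPENAI_MODELS, List.find?, if_true]
  have b1 : (l == "openai/glm-4.7".toList) = false := by simpa using e1
  have b3 : (l == "openai/glm-5".toList) = false := by simpa using e3
  have hap : ∀ r : List Char, ("openai/".toList ++ l == "openai/".toList ++ r) = false ∨ l = r := by
    intro r
    by_cases h : l = r
    · exact Or.inr h
    · refine Or.inl ?_
      rw [beq_eq_false_iff_ne]
      intro hc
      exact h (List.append_cancel_left hc)
  have bf1 : ("openai/".toList ++ l == "openai/glm-4.7".toList) = false := by
    rcases hap "glm-4.7".toList with h | h
    · exact h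
    · exact absurd h e2
  have bf3 : ("openai/".toList ++ l == "openai/glm-5".toList) = false := by
    rcases hap "glm-5".toList with h | h
    · exact h
    · exact absurd h e4
  by_cases hs : PySem.Chars.isIn "/".toList l = true
  · simp only [b1, b3, hs, if_true, if_false, List.contains, Bool.false_eq_true]
    rw [if_neg (by decide)]
    have helem : List.elem l ["openai/glm-4.7".toList, "openai/glm-5".toList] = false := by
      simp only [List.elem_cons, List.elem_nil, b1, b3]
    simp only [helem, Bool.false_eq_true, if_false]
  · have hs' : PySem.Chars.isIn "/".toList l = false := by simpa using hs
    simp only [b1, b3, hs', if_false, List.contains, Bool.false_eq_true]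
    rw [if_neg (by decide)]
    have helem : List.elem ("openai/".toList ++ l)
        ["openai/glm-4.7".toList, "openai/glm-5".toList] = false := by
      simp only [List.elem_cons, List.elem_nil, bf1, bf3]
    simp only [helem, Bool.false_eq_true, if_false]

-- A's openrouter suffix scan over an arbitrary normalized suffix IS B's table lookup
set_option maxRecDepth 8192 in
lemma pv_or_loop (s : List Char) :
    List.find? (fun full => _strip_openrouter_prefix full == s
        || _strip_openrouter_prefix full == pvRemovePrefix s ['/']) OPENROUTER_MODELS
      = pvOpenrouterForms.get? s := by
  rw [pv_or_forms_eq]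
  by_cases k1 : s = "z-ai/glm-4.7".toList
  · subst k1; decide
  by_cases k2 : s = "/z-ai/glm-4.7".toList
  · subst k2; decide
  by_cases k3 : s = "minimax/minimax-m2.7".toList
  · subst k3; decide
  by_cases k4 : s = "/minimax/minimax-m2.7".toList
  · subst k4; decide
  by_cases k5 : s = "moonshotai/kimi-k2.5".toList
  · subst k5; decide
  by_cases k6 : s = "/moonshotai/kimi-k2.5".toList
  · subst k6; decide
  by_cases k7 : s = "z-ai/glm-5".toList
  · subst k7; decide
  by_cases k8 : s = "/z-ai/glm-5".toList
  · subst k8; decide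
  have hget : (PySem.Dict.ofList
      [("z-ai/glm-4.7".toList, "openrouter/z-ai/glm-4.7".toList),
       ("/z-ai/glm-4.7".toList, "openrouter/z-ai/glm-4.7".toList),
       ("minimax/minimax-m2.7".toList, "openrouter/minimax/minimax-m2.7".toList),
       ("/minimax/minimax-m2.7".toList, "openrouter/minimax/minimax-m2.7".toList),
       ("moonshotai/kimi-k2.5".toList, "openrouter/moonshotai/kimi-k2.5".toList),
       ("/moonshotai/kimi-k2.5".toList, "openrouter/moonshotai/kimi-k2.5".toList),
       ("z-ai/glm-5".toList, "openrouter/z-ai/glm-5".toList),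
       ("/z-ai/glm-5".toList, "openrouter/z-ai/glm-5".toList)]).get? s = none := by
    simp_all [PySem.Dict.ofList, PySem.Dict.update, PySem.Dict.get?_insert]
  rw [hget]
  have n1 : pvRemovePrefix s ['/'] ≠ "z-ai/glm-4.7".toList :=
    pv_rp_slash_ne k1 (by simpa using k2)
  have n3 : pvRemovePrefix s ['/'] ≠ "minimax/minimax-m2.7".toList :=
    pv_rp_slash_ne k3 (by simpa using k4)
  have n5 : pvRemovePrefix s ['/'] ≠ "moonshotai/kimi-k2.5".toList :=
    pv_rp_slash_ne k5 (by simpa using k6)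
  have n7 : pvRemovePrefix s ['/'] ≠ "z-ai/glm-5".toList :=
    pv_rp_slash_ne k7 (by simpa using k8)
  have r1 : _strip_openrouter_prefix "openrouter/z-ai/glm-4.7".toList = "z-ai/glm-4.7".toList := by decide
  have r2 : _strip_openrouter_prefix "openrouter/minimax/minimax-m2.7".toList = "minimax/minimax-m2.7".toList := by decide
  have r3 : _strip_openrouter_prefix "openrouter/moonshotai/kimi-k2.5".toList = "moonshotai/kimi-k2.5".toList := by decide
  have r4 : _strip_openrouter_prefix "openrouter/z-ai/glm-5".toList = "z-ai/glm-5".toList := by decide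
  have c1 : ("z-ai/glm-4.7".toList == s) = false := by simpa using Ne.symm k1
  have c2 : ("minimax/minimax-m2.7".toList == s) = false := by simpa using Ne.symm k3
  have c3 : ("moonshotai/kimi-k2.5".toList == s) = false := by simpa using Ne.symm k5
  have c4 : ("z-ai/glm-5".toList == s) = false := by simpa using Ne.symm k7
  have d1 : ("z-ai/glm-4.7".toList == pvRemovePrefix s ['/']) = false := by simpa using Ne.symm n1
  have d2 : ("minimax/minimax-m2.7".toList == pvRemovePrefix s ['/']) = false := by simpa using Ne.symm n3
  have d3 : ("moonshotai/kimi-k2.5".toList == pvRemovePrefix s ['/']) = false := by simpa using Ne.symm n5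
  have d4 : ("z-ai/glm-5".toList == pvRemovePrefix s ['/']) = false := by simpa using Ne.symm n7
  simp only [OPENROUTER_MODELS, List.find?, r1, r2, r3, r4, c1, c2, c3, c4, d1, d2, d3, d4,
    Bool.or_self]

-- on non-digit input the openrouter provider resolves exactly via B's suffix table
set_option maxRecDepth 8192 in
lemma pv_arg_text_or (l : List Char) (hl : PySem.Chars.strip l = l) (h0 : ¬ l = [])
    (hd : ¬ PySem.Chars.strIsdigit l = true) :
    (resolve_model_argument "openrouter" l).1
      = pvOpenrouterForms.get? (PySem.Chars.strip (pvRemovePrefix l "openrouter/".toList)) := by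
  by_cases e1 : l = "openrouter/z-ai/glm-4.7".toList
  · subst e1; decide
  by_cases e2 : l = "openrouter/minimax/minimax-m2.7".toList
  · subst e2; decide
  by_cases e3 : l = "openrouter/moonshotai/kimi-k2.5".toList
  · subst e3; decide
  by_cases e4 : l = "openrouter/z-ai/glm-5".toList
  · subst e4; decide
  have b1 : (l == "openrouter/z-ai/glm-4.7".toList) = false := by simpa using e1
  have b2 : (l == "openrouter/minimax/minimax-m2.7".toList) = false := by simpa using e2
  have b3 : (l == "openrouter/moonshotai/kimi-k2.5".toList) = false := by simpa using e3
  have b4 : (l == "openrouter/z-ai/glm-5".toList) = false := by simpa using e4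
  simp only [resolve_model_argument, hl, h0, hd, if_false]
  simp only [models_for_provider]
  simp only [show (("openrouter" : String) = "openai") = False from by simp, if_false]
  rw [pv_or_loop (_strip_openrouter_prefix l)]
  rw [show _strip_openrouter_prefix l
      = PySem.Chars.strip (pvRemovePrefix l "openrouter/".toList) from rfl]
  simp only [OPENROUTER_MODELS, List.find?, b1, b2, b3, b4]
  cases hT : pvOpenrouterForms.get? (PySem.Chars.strip (pvRemovePrefix l "openrouter/".toList)) with
  | some h => simp
  | none => simp

-- ===== VERDICT (by name: the statement is the Claim_ definition above) =====
set_option maxRecDepth 8192 in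
theorem resolve_model_freeform_spec : Claim_equal_resolve_model_freeform := by
  intro arg _
  unfold Spec_resolve_model_freeform
  simp only [resolve_model_freeform, resolve_model_freeform_alt]
  have hss := pv_strip_strip arg.toList
  generalize hG : PySem.Chars.strip arg.toList = l at hss ⊢
  by_cases h0 : l = []
  · simp [h0]
  · by_cases hd : PySem.Chars.strIsdigit l = true
    · rw [pv_arg_digit "openai" l hss h0 hd, pv_arg_digit "openrouter" l hss h0 hd]
      simp only [models_for_provider, OPENAI_MODELS, OPENROUTER_MODELS, hd, h0,
        show (("openrouter" : String) = "openai") = False from by simp, if_true, if_false,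
        List.length_cons, List.length_nil, List.find?]
      norm_num
      generalize hn : (PySem.Int.ofChars? l).getD 0 = n
      by_cases c1 : 1 ≤ n ∧ n ≤ 4
      · obtain rfl | rfl | rfl | rfl : n = 1 ∨ n = 2 ∨ n = 3 ∨ n = 4 := by omega
        all_goals norm_num [PySem.List.pyGet?, PySem.List.pyIdx?]
        all_goals rfl
      · rw [if_pos (by omega), if_pos (by omega)]
        have e2 : (decide (1 ≤ n) && decide (n ≤ 2)) = false := by
          by_cases h : 1 ≤ n
          · simp [h, show ¬ n ≤ 2 by omega]
          · simp [h]
        have e4 : (decide (1 ≤ n) && decide (n ≤ 4)) = false := by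
          by_cases h : 1 ≤ n
          · simp [h, show ¬ n ≤ 4 by omega]
          · simp [h]
        simp only [e2, e4]
    · rw [pv_arg_text_openai l hss h0 hd, pv_arg_text_or l hss h0 hd]
      simp only [hd, h0, if_false]
      cases pvOpenaiForms.get? l with
      | some h => simp
      | none =>
        cases pvOpenrouterForms.get? (PySem.Chars.strip (pvRemovePrefix l "openrouter/".toList)) with
        | some h => simp
        | none => simp
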